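-- pv_equiv track=rewrite | github.com/ahadriaz99/MSci-Project | gen.py | get_highest_occup_number
-- ===== SOURCE A (Python) =====
-- def get_sum(n, m):
--     if (n == 0):
--         return 1
--     if (m == 0):
--         return 0
--     if (m == 1):
--         return n
--
--     s = 0
--     for i in range(n):
--         s += get_sum(n-i,m-1) + 1
--     return s
--
-- def get_highest_occup(n, id):
--     m = 0
--     while(id > get_sum(n, m)):
--         m += 1
--
--     return m
--
-- def get_highest_occup_number(n, id, m = None):
--     if(id == 0 and (m == None or m == 0)):
--         return n
--     if(id == 0 and m != 0):
--         return 0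
--     max_occup = get_highest_occup(n,id)
--     offset_id = id - get_sum(n,max_occup-1) - 1
--     occup = 0
--     if(m == None or max_occup == m):
--         occup = 1
--     if(m == None):
--         m = max_occup
--     if(n != 1):
--         return occup + get_highest_occup_number(n-1, offset_id, m)
--     return occup
-- ===== SOURCE B (Python) =====
-- def get_highest_occup_number(n, id, m=None):
--     # Decodes the occupation number from an index by maintaining the running
--     # binomial coefficients C(n+mo, mo) incrementally (exact integer updates),
--     # instead of A's exponential-time recursive get_sum.
--     if id == 0:
--         return n if (m is None or m == 0) else 0
--     count = 0
--     while True: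
--         # find the least mo >= 1 with id <= C(n+mo, mo) - 1,
--         # keeping prev = C(n+mo-1, mo-1) and cur = C(n+mo, mo)
--         mo, prev, cur = 1, 1, n + 1
--         while cur - 1 < id:
--             mo += 1
--             prev = cur
--             cur = cur * (n + mo) // mo
--         id -= prev
--         if m is None:
--             m = mo
--         if mo == m:
--             count += 1
--         if n == 1:
--             return count
--         n -= 1
--         if id == 0:
--             return count + (n if m == 0 else 0)
-- ===== Notes on version B (the rewrite author's own statement) =====
-- stated objective: faster
-- what changed: Replaces the exponential recursive get_sum (and its linear rescans) by maintaining the binomial coefficients C(n+mo,mo) incrementally with exact integer multiply/divide updates inside one iterative loop, using the closed form get_sum(n,m)=C(n+m,m)-1.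
import Mathlib
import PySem

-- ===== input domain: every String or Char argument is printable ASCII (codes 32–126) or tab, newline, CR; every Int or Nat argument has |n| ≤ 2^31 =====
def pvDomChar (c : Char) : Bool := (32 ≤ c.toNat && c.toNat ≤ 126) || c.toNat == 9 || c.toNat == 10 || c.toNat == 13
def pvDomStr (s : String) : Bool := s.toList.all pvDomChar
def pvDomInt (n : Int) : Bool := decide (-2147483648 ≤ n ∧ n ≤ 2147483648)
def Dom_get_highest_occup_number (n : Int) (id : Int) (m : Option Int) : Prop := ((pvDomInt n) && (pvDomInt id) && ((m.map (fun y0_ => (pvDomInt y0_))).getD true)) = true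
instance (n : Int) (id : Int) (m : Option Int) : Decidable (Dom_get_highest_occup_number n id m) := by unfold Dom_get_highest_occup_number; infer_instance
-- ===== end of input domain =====

-- B replaces A's exponential recursive get_sum by incrementally maintained binomial
-- coefficients (exact integer updates), an asymptotically faster decode of the same index.
-- Recursions/loops are encoded structurally on a Nat that mirrors each Python loop's
-- progress exactly on the admitted inputs; the fuel-0 fallbacks are totalizing only and
-- correspond to inputs where the Python diverges (all excluded by Pre_).

-- ===== PORT A =====
-- get_sum, literal port; recursion is on m, encoded as the Nat m.toNat (each call
-- decreases m by 1).  The fuel-0 `else 0` is where Python's get_sum recurses forever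
-- (m < 0 with n ≥ 1; never reached from inputs satisfying Pre_).
def getSumAux (n m : Int) : Nat → Int
  | 0 => if n = 0 then 1 else if m = 0 then 0 else if m = 1 then n else 0
  | k + 1 =>
    if n = 0 then 1
    else if m = 0 then 0
    else if m = 1 then n
    else (PySem.List.pyRange 0 n).foldl (fun s i => s + (getSumAux (n - i) (m - 1) k + 1)) 0

def getSum (n m : Int) : Int := getSumAux n m m.toNat

-- while-loop of get_highest_occup; the loop counter m starts at 0 and, on the inputs
-- Pre_ admits, stays below id (get_sum n m ≥ m for n ≥ 1), so (id - m).toNat bounds the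
-- remaining iterations exactly; fuel 0 (where Python's loop never ends) returns mo.
def getHighestOccupAux (n idv mo : Int) : Nat → Int
  | 0 => mo
  | k + 1 => if getSum n mo < idv then getHighestOccupAux n idv (mo + 1) k else mo

def getHighestOccup (n idv : Int) : Int := getHighestOccupAux n idv 0 idv.toNat

-- main recursion of A, on n (each call decreases n by 1, stopping at n = 1), encoded
-- as the Nat n.toNat + 1; fuel 0 is unreachable: Python diverges earlier (inside
-- get_highest_occup) whenever n ≤ 0 and id ≠ 0, and id = 0 returns before recursing.
def ghonAux (n id : Int) (m : Option Int) : Nat → Int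
  | 0 => 0
  | k + 1 =>
    if id = 0 ∧ (m = none ∨ m = some 0) then n
    else if id = 0 ∧ m ≠ some 0 then 0
    else
      let max_occup := getHighestOccup n id
      let offset_id := id - getSum n (max_occup - 1) - 1
      let occup : Int := if m = none ∨ m = some max_occup then 1 else 0
      let m' := m.getD max_occup
      if n ≠ 1 then occup + ghonAux (n - 1) offset_id (some m') k
      else occup

def get_highest_occup_number (n : Int) (id : Int) (m : Option Int) : Int :=
  ghonAux n id m (n.toNat + 1)

-- ===== PORT B =====
-- inner while-loop of Source B: advance mo keeping prev = C(n+mo-1,mo-1), cur = C(n+mo,mo);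
-- on admitted inputs cur - 1 ≥ mo, so (idv - mo).toNat bounds the iterations exactly.
def bInner (n idv mo prev cur : Int) : Nat → Int × Int
  | 0 => (mo, prev)
  | k + 1 =>
    if cur - 1 < idv then
      bInner n idv (mo + 1) cur (PySem.Int.floordiv (cur * (n + (mo + 1))) (mo + 1)) k
    else (mo, prev)

-- outer while-True loop of Source B, on n decreasing to 1; fuel n.toNat is exact under Pre_
-- (fuel 0 means n ≤ 0, which Pre_ excludes when id ≠ 0).
def bOuter (n idv : Int) (m : Option Int) (count : Int) : Nat → Int
  | 0 => count
  | k + 1 =>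
    let p := bInner n idv 1 1 (n + 1) (idv - 1).toNat
    let idv' := idv - p.2
    let m' := m.getD p.1
    let count' := if p.1 = m' then count + 1 else count
    if n = 1 then count'
    else if idv' = 0 then count' + (if m' = 0 then n - 1 else 0)
    else bOuter (n - 1) idv' (some m') count' k

def get_highest_occup_number_alt (n : Int) (id : Int) (m : Option Int) : Int :=
  if id = 0 then (if m = none ∨ m = some 0 then n else 0)
  else bOuter n id m 0 n.toNat

-- ===== PRECONDITION & SPEC =====
-- Pre_ excludes exactly the inputs where Python A never returns: with id ≠ 0 and
-- n ≤ 0 the while-loop in get_highest_occup (or get_sum's recursion) diverges, and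
-- with id < 0 get_sum is called with a negative m and recurses past the recursion
-- limit.  On id = 0 A returns for every n, and for n ≥ 1 it returns for every id ≥ 1.
def Pre_get_highest_occup_number (n : Int) (id : Int) (m : Option Int) : Prop :=
  id = 0 ∨ (1 ≤ n ∧ 1 ≤ id)
instance (n : Int) (id : Int) (m : Option Int) : Decidable (Pre_get_highest_occup_number n id m) := by unfold Pre_get_highest_occup_number; infer_instance

def pvWitness_get_highest_occup_number : Int × Int × Option Int := (3, 7, none)

def Spec_get_highest_occup_number (n : Int) (id : Int) (m : Option Int) (out : Int) : Prop := out = get_highest_occup_number_alt n id m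
instance (n : Int) (id : Int) (m : Option Int) (out : Int) : Decidable (Spec_get_highest_occup_number n id m out) := by unfold Spec_get_highest_occup_number; infer_instance

-- ===== CLAIM (what is proved, stated in full; the proofs are below) =====
def Claim_equal_get_highest_occup_number : Prop := ∀ (n : Int) (id : Int) (m : Option Int), Dom_get_highest_occup_number n id m → Pre_get_highest_occup_number n id m → Spec_get_highest_occup_number n id m (get_highest_occup_number n id m)

-- ===== LEMMAS AND PROOFS =====

-- hockey-stick, list form: ∑_{i<nn} C(nn-i+mm, mm) = C(nn+mm+1, mm+1) - 1 over ℤ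
lemma sum_range_choose_int (mm : Nat) : ∀ (nn : Nat),
    ((List.range nn).map (fun i => (((nn - i + mm).choose mm : Nat) : Int))).sum
      = (((nn + mm + 1).choose (mm + 1) : Nat) : Int) - 1 := by
  intro nn
  induction nn with
  | zero => simp
  | succ k ih =>
    rw [List.range_succ_eq_map, List.map_cons, List.map_map, List.sum_cons]
    have hbody : ((List.range k).map ((fun i => (((k + 1 - i + mm).choose mm : Nat) : Int)) ∘ Nat.succ))
        = (List.range k).map (fun i => (((k - i + mm).choose mm : Nat) : Int)) := by
      apply List.map_congr_left
      intro i _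
      simp [Function.comp, Nat.succ_sub_succ]
    rw [hbody, ih]
    rw [show k + 1 - 0 + mm = k + mm + 1 by omega]
    rw [show k + 1 + mm + 1 = (k + mm + 1) + 1 by omega, Nat.choose_succ_succ' (k + mm + 1) mm]
    have hpos : 1 ≤ (k + mm + 1).choose (mm + 1) := Nat.choose_pos (by omega)
    push_cast
    omega

-- closed form of A's get_sum: for n ≥ 1, m ≥ 0, get_sum n m = C(n+m, m) - 1
lemma getSum_closed : ∀ (k : Nat) (m n : Int), m.toNat = k → 0 ≤ m → 1 ≤ n →
    getSum n m = (((n.toNat + m.toNat).choose m.toNat : Nat) : Int) - 1 := by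
  intro k
  induction k using Nat.strong_induction_on with
  | _ k ih =>
    intro m n hk hm hn
    have hn0 : n ≠ 0 := by omega
    rw [getSum, hk]
    rcases eq_or_lt_of_le hm with h0 | hpos
    · have hk0 : k = 0 := by omega
      subst hk0
      simp [getSumAux, hn0, ← h0]
    rcases eq_or_lt_of_le (show (1:Int) ≤ m by omega) with h1 | h2
    · have hk1 : k = 1 := by omega
      subst hk1
      simp [getSumAux, hn0, ← h1, Nat.choose_one_right]
      omega
    · -- m ≥ 2, so k ≥ 2
      obtain ⟨k', rfl⟩ : ∃ k', k = k' + 1 := ⟨k - 1, by omega⟩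
      have hm0 : m ≠ 0 := by omega
      have hm1 : m ≠ 1 := by omega
      simp only [getSumAux, hn0, hm0, hm1, if_false]
      rw [show n = ((n.toNat : Nat) : Int) by omega, PySem.List.pyRange_zero_natCast,
        List.foldl_map, PySem.List.foldl_add]
      set mm : Nat := (m - 1).toNat with hmm
      have hbody : ((List.range n.toNat).map (fun (i : Nat) => getSumAux (((n.toNat : Nat) : Int) - ((i : Nat) : Int)) (m - 1) k' + 1))
          = (List.range n.toNat).map (fun (i : Nat) => (((n.toNat - i + mm).choose mm : Nat) : Int)) := by
      -- each summand is getSum (n - i) (m - 1) + 1, to which the induction hypothesis applies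
        apply List.map_congr_left
        intro i hi
        rw [List.mem_range] at hi
        have hfuel : getSumAux (((n.toNat : Nat) : Int) - ((i : Nat) : Int)) (m - 1) k'
            = getSum (((n.toNat : Nat) : Int) - ((i : Nat) : Int)) (m - 1) := by
          rw [getSum, show (m - 1).toNat = k' by omega]
        rw [hfuel, ih k' (by omega) (m - 1) (((n.toNat : Nat) : Int) - ((i : Nat) : Int))
          (by omega) (by omega) (by omega)]
        have harg : ((((n.toNat : Nat) : Int) - ((i : Nat) : Int)).toNat) = n.toNat - i := by omega
        rw [harg, ← hmm]
        omega
      rw [hbody, sum_range_choose_int]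
      simp only [Int.toNat_natCast]
      have h1 : n.toNat + mm + 1 = n.toNat + (k' + 1) := by omega
      have h2 : mm + 1 = k' + 1 := by omega
      rw [h1, h2]
      omega

lemma getSum_zero (n : Int) (hn : 1 ≤ n) : getSum n 0 = 0 := by
  rw [getSum]; simp [getSumAux, show n ≠ 0 by omega]

-- loop post-conditions for A's while-loop
lemma haux_ge (n idv : Int) : ∀ (k : Nat) (mo : Int),
    mo ≤ getHighestOccupAux n idv mo k := by
  intro k
  induction k with
  | zero => intro mo; simp [getHighestOccupAux]
  | succ k ih =>
    intro mo
    rw [getHighestOccupAux]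
    split
    · have := ih (mo + 1); omega
    · omega

lemma haux_lower (n idv : Int) : ∀ (k : Nat) (mo : Int),
    getSum n (mo - 1) < idv → getSum n (getHighestOccupAux n idv mo k - 1) < idv := by
  intro k
  induction k with
  | zero => intro mo h; simpa [getHighestOccupAux] using h
  | succ k ih =>
    intro mo h
    rw [getHighestOccupAux]
    split
    · next hc => exact ih (mo + 1) (by simpa using hc)
    · simpa using h

-- B's inner loop tracks A's while-loop: with prev/cur the two binomial coefficients
-- at mo and the same remaining fuel, bInner returns (result r of A's loop, C(n+r-1, r-1)).
lemma bInner_eq_haux (n idv : Int) (hn : 1 ≤ n) : ∀ (k : Nat) (mo : Int), 1 ≤ mo →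
    bInner n idv mo (((n + mo - 1).toNat.choose (mo - 1).toNat : Nat) : Int)
        (((n + mo).toNat.choose mo.toNat : Nat) : Int) k
      = (getHighestOccupAux n idv mo k,
         ((((n + getHighestOccupAux n idv mo k - 1).toNat.choose (getHighestOccupAux n idv mo k - 1).toNat : Nat)) : Int)) := by
  intro k
  induction k with
  | zero => intro mo _; simp [bInner, getHighestOccupAux]
  | succ k ih =>
    intro mo hmo
    have hcond : ((((n + mo).toNat.choose mo.toNat : Nat) : Int) - 1 < idv)
        ↔ (getSum n mo < idv) := by
      rw [getSum_closed mo.toNat mo n rfl (by omega) hn,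
        show (n + mo).toNat = n.toNat + mo.toNat by omega]
    rw [bInner, getHighestOccupAux]
    by_cases h : getSum n mo < idv
    · rw [if_pos (hcond.mpr h), if_pos h]
      -- the incremental update computes the next binomial coefficient exactly
      have hchoose : PySem.Int.floordiv ((((n + mo).toNat.choose mo.toNat : Nat) : Int) * (n + (mo + 1))) (mo + 1)
          = (((n + (mo + 1)).toNat.choose (mo + 1).toNat : Nat) : Int) := by
        rw [PySem.Int.floordiv_eq_ediv_of_pos (by omega)]
        have hkey := Nat.add_one_mul_choose_eq (n.toNat + mo.toNat) mo.toNat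
        have hnb : (n + mo).toNat = n.toNat + mo.toNat := by omega
        have hnc : (n + (mo + 1)).toNat = n.toNat + mo.toNat + 1 := by omega
        have hnd : (mo + 1).toNat = mo.toNat + 1 := by omega
        rw [hnb, hnc, hnd]
        have hmul : (((n.toNat + mo.toNat).choose mo.toNat : Nat) : Int) * (n + (mo + 1))
            = (((n.toNat + mo.toNat + 1).choose (mo.toNat + 1) : Nat) : Int) * ((mo : Int) + 1) := by
          have h1 : n + (mo + 1) = (((n.toNat + mo.toNat + 1 : Nat)) : Int) := by omega
          have h2 : (mo : Int) + 1 = (((mo.toNat + 1 : Nat)) : Int) := by omega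
          rw [h1, h2]
          push_cast
          push_cast at hkey
          nlinarith [hkey]
        rw [hmul, Int.mul_ediv_cancel _ (by omega : (mo : Int) + 1 ≠ 0)]
      rw [hchoose]
      have harg1 : (((n + mo).toNat.choose mo.toNat : Nat) : Int)
          = (((n + (mo + 1) - 1).toNat.choose ((mo + 1) - 1).toNat : Nat) : Int) := by
        rw [show n + (mo + 1) - 1 = n + mo by ring, show (mo : Int) + 1 - 1 = mo by ring]
      rw [harg1]
      exact ih (mo + 1) (by omega)
    · rw [if_neg (fun hc => h (hcond.mp hc)), if_neg h]

-- A's base case id = 0 inside the recursion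
lemma portA_base (n v : Int) :
    get_highest_occup_number n 0 (some v) = if v = 0 then n else 0 := by
  rw [get_highest_occup_number, ghonAux]
  by_cases hv : v = 0
  · simp [hv]
  · simp [hv, Option.some.injEq]

-- main loop correspondence: bOuter carries A's recursion in its accumulator
lemma bOuter_eq : ∀ (k : Nat) (n idv : Int) (m : Option Int) (count : Int),
    n.toNat = k → 1 ≤ n → 1 ≤ idv →
    bOuter n idv m count k = count + get_highest_occup_number n idv m := by
  intro k
  induction k using Nat.strong_induction_on with
  | _ k ih =>
    intro n idv m count hkk hn hid
    obtain ⟨k', rfl⟩ : ∃ k', k = k' + 1 := ⟨k - 1, by omega⟩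
    have hhz : getHighestOccupAux n idv 0 idv.toNat = getHighestOccupAux n idv 1 (idv - 1).toNat := by
      obtain ⟨j, hj⟩ : ∃ j, idv.toNat = j + 1 := ⟨idv.toNat - 1, by omega⟩
      rw [hj, getHighestOccupAux, if_pos (by rw [getSum_zero n hn]; omega),
        show j = (idv - 1).toNat by omega]
      norm_num
    set mo := getHighestOccupAux n idv 1 (idv - 1).toNat with hmo
    have hmo1 : 1 ≤ mo := haux_ge n idv (idv - 1).toNat 1
    have hlow : getSum n (mo - 1) < idv := by
      have h01 : getSum n ((1:Int) - 1) < idv := by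
        rw [show (1:Int) - 1 = 0 by ring, getSum_zero n hn]; omega
      exact haux_lower n idv (idv - 1).toNat 1 h01
    have hprev : (((n + mo - 1).toNat.choose (mo - 1).toNat : Nat) : Int) = getSum n (mo - 1) + 1 := by
      rw [getSum_closed (mo - 1).toNat (mo - 1) n rfl (by omega) hn,
        show (n + mo - 1).toNat = n.toNat + (mo - 1).toNat by omega]
      ring
    have hinner : bInner n idv 1 1 (n + 1) (idv - 1).toNat = (mo, getSum n (mo - 1) + 1) := by
      have h := bInner_eq_haux n idv hn (idv - 1).toNat 1 (le_refl 1)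
      rw [show (((n + 1 - 1).toNat.choose ((1:Int) - 1).toNat : Nat) : Int) = 1 by norm_num] at h
      rw [show (((n + 1).toNat.choose (1:Int).toNat : Nat) : Int) = n + 1 by
        rw [show ((1:Int)).toNat = 1 from rfl, Nat.choose_one_right]; omega] at h
      rw [h, ← hmo, hprev]
    -- one step of A
    have hA : get_highest_occup_number n idv m
        = (if m = none ∨ m = some mo then 1 else 0)
          + (if n ≠ 1 then get_highest_occup_number (n - 1) (idv - getSum n (mo - 1) - 1) (some (m.getD mo)) else 0) := by
      rw [get_highest_occup_number, ghonAux]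
      simp only [getHighestOccup, hhz]
      rw [if_neg (show ¬ (idv = 0 ∧ (m = none ∨ m = some 0)) by rintro ⟨h, -⟩; omega),
        if_neg (show ¬ (idv = 0 ∧ m ≠ some 0) by rintro ⟨h, -⟩; omega)]
      by_cases hone : n = 1
      · rw [if_neg (show ¬ (n ≠ 1) by simpa using hone),
          if_neg (show ¬ (n ≠ 1) by simpa using hone)]
        ring
      · rw [if_pos (show n ≠ 1 from hone), if_pos (show n ≠ 1 from hone),
          get_highest_occup_number, show (n - 1).toNat + 1 = n.toNat by omega]
    -- one step of B
    rw [bOuter]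
    simp only [hinner]
    have hcount : (if mo = (m.getD mo) then count + 1 else count)
        = count + (if m = none ∨ m = some mo then 1 else 0) := by
      cases m with
      | none => simp
      | some v =>
        simp only [Option.getD_some, Option.some.injEq, reduceCtorEq, false_or]
        by_cases hv : v = mo
        · simp [hv]
        · rw [if_neg (by omega), if_neg (by omega)]
          ring
    rw [hcount, hA]
    set occup : Int := if m = none ∨ m = some mo then 1 else 0 with hoccup
    by_cases hone : n = 1
    · rw [if_pos (show n = 1 from hone), if_neg (show ¬ (n ≠ 1) by simpa using hone)]
      ring
    · rw [if_neg (show ¬ (n = 1) from hone), if_pos (show n ≠ 1 from hone)]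
      rw [show idv - (getSum n (mo - 1) + 1) = idv - getSum n (mo - 1) - 1 by ring]
      set off := idv - getSum n (mo - 1) - 1 with hoffdef
      have hoff0 : 0 ≤ off := by omega
      by_cases hz : off = 0
      · rw [if_pos hz, hz, portA_base (n - 1) (m.getD mo)]
        ring
      · rw [if_neg hz,
          ih k' (by omega) (n - 1) off (some (m.getD mo)) (count + occup) (by omega) (by omega) (by omega)]
        ring

-- ===== VERDICT (by name: the statement is the Claim_ definition above) =====
theorem get_highest_occup_number_spec : Claim_equal_get_highest_occup_number := by
  intro n id m _ hpre
  unfold Spec_get_highest_occup_number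
  rcases hpre with h0 | ⟨hn, hid⟩
  · subst h0
    rw [get_highest_occup_number_alt, if_pos rfl, get_highest_occup_number, ghonAux]
    by_cases hm : m = none ∨ m = some 0
    · rw [if_pos ⟨rfl, hm⟩, if_pos hm]
    · rw [if_neg (by rintro ⟨-, h⟩; exact hm h), if_neg hm,
        if_pos ⟨rfl, by rintro h; exact hm (Or.inr h)⟩]
  · rw [get_highest_occup_number_alt, if_neg (by omega)]
    rw [bOuter_eq n.toNat n id m 0 rfl hn hid]
    ring
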